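-- pv_equiv track=rewrite | github.com/10-05-15/AoC2024 | puzzle2-2-1.py | check_dampened_safety
-- ===== SOURCE A (Python) =====
-- def is_safe_sequence(levels):
--     """Check if a sequence of levels is safe according to the rules."""
--     if len(levels) < 2:
--         return True
--
--     # Check first difference to determine direction
--     dir_up = levels[1] > levels[0]
--
--     for i in range(len(levels) - 1):
--         diff = levels[i + 1] - levels[i]
--
--         # Must maintain same direction
--         if dir_up and diff <= 0:
--             return False
--         if not dir_up and diff >= 0:
--             return False
--
--         # Must differ by 1-3
--         if abs(diff) < 1 or abs(diff) > 3:
--             return False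
--
--     return True
--
-- def check_dampened_safety(levels):
--     """Check if sequence is safe with Problem Dampener (can remove one number)."""
--     # First check if already safe
--     if is_safe_sequence(levels):
--         return True
--
--     # Try removing each number one at a time
--     for i in range(len(levels)):
--         test_sequence = levels[:i] + levels[i+1:]
--         if is_safe_sequence(test_sequence):
--             return True
--
--     return False
-- ===== SOURCE B (Python) =====
-- def _all_steps(seq, lo, hi):
--     """True iff every adjacent difference d satisfies lo <= d <= hi."""
--     return all(lo <= b - a <= hi for a, b in zip(seq, seq[1:]))
--
--
-- def _safe(seq):
--     """Safe = strictly increasing by 1..3 throughout, or decreasing by 1..3."""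
--     return _all_steps(seq, 1, 3) or _all_steps(seq, -3, -1)
--
--
-- def check_dampened_safety(levels):
--     # Already safe without removing anything.
--     if _safe(levels):
--         return True
--     # Not safe, so len(levels) >= 2.  Find one violating adjacent pair under
--     # the direction set by the first pair; a removal can only help if it is
--     # one of that pair or one of the two direction-setting elements.
--     up = levels[1] > levels[0]
--     k = None
--     for i in range(len(levels) - 1):
--         d = levels[i + 1] - levels[i]
--         if not ((1 <= d <= 3) if up else (-3 <= d <= -1)):
--             k = i
--             break
--     if k is None:  # unreachable: an unsafe sequence has a violating pair
--         return True
--     return any(_safe(levels[:j] + levels[j + 1:]) for j in (0, 1, k, k + 1))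
-- ===== Notes on version B (the rewrite author's own statement) =====
-- stated objective: faster
-- what changed: A retries the full safety scan after removing every index (quadratic); B makes one pass to locate a violating adjacent pair and tests only the four removals (indices 0, 1, k, k+1) that could repair it, and checks safety as monotone-by-1..3 in either direction instead of a direction-flag loop.
import Mathlib
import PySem

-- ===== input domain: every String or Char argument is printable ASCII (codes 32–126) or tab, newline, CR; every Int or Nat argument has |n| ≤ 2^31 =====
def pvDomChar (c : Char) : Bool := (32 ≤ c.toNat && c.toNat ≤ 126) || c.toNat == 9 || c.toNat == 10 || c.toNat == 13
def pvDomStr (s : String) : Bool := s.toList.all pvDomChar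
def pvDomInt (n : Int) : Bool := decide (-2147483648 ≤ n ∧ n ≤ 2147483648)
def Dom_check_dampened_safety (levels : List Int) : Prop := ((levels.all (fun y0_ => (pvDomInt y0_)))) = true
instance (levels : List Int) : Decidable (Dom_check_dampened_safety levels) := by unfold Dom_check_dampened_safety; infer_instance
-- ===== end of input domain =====

-- B replaces A's O(n^2) try-every-removal scan by a single pass: find one violating
-- adjacent pair and test only the four removals that can possibly repair it.

-- ===== PORT A =====
-- for i in range(...): the loop body over the list of indices; all indices are in
-- range in the Python, so List.getD _ 0 is exact for levels[i].
def pvLoopSafeA (l : List Int) (dirUp : Bool) : List Nat → Bool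
  | [] => true
  | i :: rest =>
    let diff := l.getD (i + 1) 0 - l.getD i 0
    if dirUp && decide (diff ≤ 0) then false
    else if (!dirUp) && decide (0 ≤ diff) then false
    else if decide (|diff| < 1) || decide (3 < |diff|) then false
    else pvLoopSafeA l dirUp rest

def pvIsSafeA (l : List Int) : Bool :=
  if l.length < 2 then true
  else pvLoopSafeA l (decide (l.getD 0 0 < l.getD 1 0)) (List.range (l.length - 1))

-- levels[:i] + levels[i+1:] = l.take i ++ l.drop (i+1) (nonneg in-range slice bounds)
def pvLoopDampA (l : List Int) : List Nat → Bool
  | [] => false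
  | i :: rest =>
    if pvIsSafeA (l.take i ++ l.drop (i + 1)) then true else pvLoopDampA l rest

def check_dampened_safety (levels : List Int) : Bool :=
  if pvIsSafeA levels then true
  else pvLoopDampA levels (List.range levels.length)

-- ===== PORT B =====
-- all(lo <= b - a <= hi for a, b in zip(seq, seq[1:]))
def pvStepsAll (l : List Int) (lo hi : Int) : Bool :=
  (l.zip l.tail).all fun p => decide (lo ≤ p.2 - p.1 ∧ p.2 - p.1 ≤ hi)

def pvSafeB (l : List Int) : Bool := pvStepsAll l 1 3 || pvStepsAll l (-3) (-1)

-- the k-search loop: first index whose adjacent step violates the direction rule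
def pvFindBad (l : List Int) (up : Bool) : List Nat → Option Nat
  | [] => none
  | i :: rest =>
    let d := l.getD (i + 1) 0 - l.getD i 0
    if (if up then decide (1 ≤ d ∧ d ≤ 3) else decide (-3 ≤ d ∧ d ≤ -1)) then
      pvFindBad l up rest
    else some i

def check_dampened_safety_alt (levels : List Int) : Bool :=
  if pvSafeB levels then true
  else
    match pvFindBad levels (decide (levels.getD 0 0 < levels.getD 1 0))
        (List.range (levels.length - 1)) with
    | none => true   -- unreachable: an unsafe sequence has a violating pair
    | some k => [0, 1, k, k + 1].any fun j => pvSafeB (levels.take j ++ levels.drop (j + 1))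

-- ===== PRECONDITION & SPEC =====
def Spec_check_dampened_safety (levels : List Int) (out : Bool) : Prop := out = check_dampened_safety_alt levels
instance (levels : List Int) (out : Bool) : Decidable (Spec_check_dampened_safety levels out) := by unfold Spec_check_dampened_safety; infer_instance

-- ===== CLAIM (what is proved, stated in full; the proofs are below) =====
def Claim_equal_check_dampened_safety : Prop := ∀ (levels : List Int), Dom_check_dampened_safety levels → Spec_check_dampened_safety levels (check_dampened_safety levels)

-- ===== LEMMAS AND PROOFS =====

-- common reference predicate: the step at index i is legal for direction `up`
def pvOk (up : Bool) (a b : Int) : Bool :=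
  if up then decide (1 ≤ b - a ∧ b - a ≤ 3) else decide (-3 ≤ b - a ∧ b - a ≤ -1)

-- reference safety check: every adjacent step legal for the first pair's direction
def pvS (l : List Int) : Bool :=
  (List.range (l.length - 1)).all fun i =>
    pvOk (decide (l.getD 0 0 < l.getD 1 0)) (l.getD i 0) (l.getD (i + 1) 0)

theorem pvStep_eq (up : Bool) (a b : Int) (x : Bool) :
    (if up && decide (b - a ≤ 0) then false
     else if (!up) && decide (0 ≤ b - a) then false
     else if decide (|b - a| < 1) || decide (3 < |b - a|) then false
     else x) = (pvOk up a b && x) := by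
  rcases (by omega : 0 ≤ b - a ∨ b - a < 0) with h | h
  · simp only [abs_of_nonneg h]
    cases up <;> cases x <;> simp [pvOk] <;> (apply Bool.eq_iff_iff.mpr; simp; omega)
  · simp only [abs_of_neg h]
    cases up <;> cases x <;> simp [pvOk] <;> (apply Bool.eq_iff_iff.mpr; simp; omega)

theorem pvLoopSafeA_eq (l : List Int) (up : Bool) (is : List Nat) :
    pvLoopSafeA l up is = is.all (fun i => pvOk up (l.getD i 0) (l.getD (i + 1) 0)) := by
  induction is with
  | nil => rfl
  | cons i rest ih =>
    rw [List.all_cons, ← ih, pvLoopSafeA]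
    exact pvStep_eq up (l.getD i 0) (l.getD (i + 1) 0) _

theorem pvIsSafeA_eq (l : List Int) : pvIsSafeA l = pvS l := by
  unfold pvIsSafeA pvS
  split
  · rename_i h
    have : l.length - 1 = 0 := by omega
    rw [this]; rfl
  · exact pvLoopSafeA_eq l _ _

theorem pvStepsAll_eq (lo hi : Int) (l : List Int) :
    pvStepsAll l lo hi = (List.range (l.length - 1)).all
      (fun i => decide (lo ≤ l.getD (i + 1) 0 - l.getD i 0 ∧ l.getD (i + 1) 0 - l.getD i 0 ≤ hi)) := by
  induction l with
  | nil => rfl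
  | cons a t ih =>
    cases t with
    | nil => rfl
    | cons b t' =>
      rw [show (a :: b :: t').length - 1 = ((b :: t').length - 1) + 1 by
            simp [List.length_cons],
          List.range_succ_eq_map, List.all_cons, List.all_map]
      show (decide _ && pvStepsAll (b :: t') lo hi) = _
      rw [ih]
      rfl

theorem pvLoopDampA_eq (l : List Int) (is : List Nat) :
    pvLoopDampA l is = is.any (fun i => pvIsSafeA (l.take i ++ l.drop (i + 1))) := by
  induction is with
  | nil => rfl
  | cons i rest ih =>
    rw [List.any_cons, ← ih, pvLoopDampA]
    split <;> simp_all

theorem pvSafeB_eq (l : List Int) : pvSafeB l = pvS l := by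
  rcases l with _ | ⟨a, _ | ⟨b, t⟩⟩
  · rfl
  · rfl
  · have h0 : (0 : ℕ) ∈ List.range ((a :: b :: t).length - 1) := by
      simp [List.length_cons]
    by_cases hab : a < b
    · have hu : decide ((a :: b :: t).getD 0 0 < (a :: b :: t).getD 1 0) = true := by
        simpa using hab
      have hdec : pvStepsAll (a :: b :: t) (-3) (-1) = false := by
        rw [pvStepsAll_eq]
        by_contra hc
        have hall := List.all_eq_true.mp (Bool.of_not_eq_false hc) 0 h0
        simp at hall
        omega
      unfold pvSafeB pvS
      rw [hdec, Bool.or_false, pvStepsAll_eq, hu]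
      simp [pvOk]
    · have hu : decide ((a :: b :: t).getD 0 0 < (a :: b :: t).getD 1 0) = false := by
        simpa using hab
      have hinc : pvStepsAll (a :: b :: t) 1 3 = false := by
        rw [pvStepsAll_eq]
        by_contra hc
        have hall := List.all_eq_true.mp (Bool.of_not_eq_false hc) 0 h0
        simp at hall
        omega
      unfold pvSafeB pvS
      rw [hinc, Bool.false_or, pvStepsAll_eq, hu]
      simp [pvOk]

theorem pvFindBad_none (l : List Int) (up : Bool) (is : List Nat)
    (h : pvFindBad l up is = none) :
    is.all (fun i => pvOk up (l.getD i 0) (l.getD (i + 1) 0)) = true := by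
  induction is with
  | nil => rfl
  | cons i rest ih =>
    simp only [pvFindBad] at h
    rw [show (if up then decide (1 ≤ l.getD (i + 1) 0 - l.getD i 0 ∧ l.getD (i + 1) 0 - l.getD i 0 ≤ 3)
          else decide (-3 ≤ l.getD (i + 1) 0 - l.getD i 0 ∧ l.getD (i + 1) 0 - l.getD i 0 ≤ -1)) =
        pvOk up (l.getD i 0) (l.getD (i + 1) 0) from by cases up <;> rfl] at h
    rcases hok : pvOk up (l.getD i 0) (l.getD (i + 1) 0) with _ | _ <;> rw [hok] at h
    · simp at h
    · rw [List.all_cons, ih (by simpa using h), hok]; rfl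

theorem pvFindBad_some (l : List Int) (up : Bool) (is : List Nat) (k : Nat)
    (h : pvFindBad l up is = some k) :
    k ∈ is ∧ pvOk up (l.getD k 0) (l.getD (k + 1) 0) = false := by
  induction is with
  | nil => exact absurd h (by simp [pvFindBad])
  | cons i rest ih =>
    simp only [pvFindBad] at h
    rw [show (if up then decide (1 ≤ l.getD (i + 1) 0 - l.getD i 0 ∧ l.getD (i + 1) 0 - l.getD i 0 ≤ 3)
          else decide (-3 ≤ l.getD (i + 1) 0 - l.getD i 0 ∧ l.getD (i + 1) 0 - l.getD i 0 ≤ -1)) =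
        pvOk up (l.getD i 0) (l.getD (i + 1) 0) from by cases up <;> rfl] at h
    rcases hok : pvOk up (l.getD i 0) (l.getD (i + 1) 0) with _ | _ <;> rw [hok] at h
    · simp at h
      subst h
      exact ⟨List.mem_cons_self .., hok⟩
    · rcases ih (by simpa using h) with ⟨hm, hb⟩
      exact ⟨List.mem_cons_of_mem _ hm, hb⟩

-- getD on an eraseIdx: indices below the erased one are unchanged, others shift
theorem pvGetD_erase_lt (l : List Int) (j i : Nat) (h : i < j) :
    (l.eraseIdx j).getD i 0 = l.getD i 0 := by
  rw [List.getD_eq_getElem?_getD, List.getD_eq_getElem?_getD]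
  congr 1
  exact List.getElem?_eraseIdx_of_lt h

theorem pvGetD_erase_ge (l : List Int) (j i : Nat) (h : j ≤ i) :
    (l.eraseIdx j).getD i 0 = l.getD (i + 1) 0 := by
  rw [List.getD_eq_getElem?_getD, List.getD_eq_getElem?_getD]
  congr 1
  exact List.getElem?_eraseIdx_of_ge h

-- the heart of B: a removal away from {0, 1, k, k+1} leaves the violation at k intact
theorem pvPersist (l : List Int) (k j : Nat) (hk : k + 1 < l.length) (hj : j < l.length)
    (h2 : 2 ≤ j) (hjk : j ≠ k) (hjk1 : j ≠ k + 1)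
    (hbad : pvOk (decide (l.getD 0 0 < l.getD 1 0)) (l.getD k 0) (l.getD (k + 1) 0) = false) :
    pvS (l.take j ++ l.drop (j + 1)) = false := by
  rw [← List.eraseIdx_eq_take_drop_succ]
  have hlen : (l.eraseIdx j).length = l.length - 1 := by
    rw [List.length_eraseIdx]; simp [hj]
  have hd0 : (l.eraseIdx j).getD 0 0 = l.getD 0 0 := pvGetD_erase_lt l j 0 (by omega)
  have hd1 : (l.eraseIdx j).getD 1 0 = l.getD 1 0 := pvGetD_erase_lt l j 1 (by omega)
  rcases Nat.lt_or_ge j k with hlt | hge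
  · -- j < k : the pair survives at indices (k-1, k)
    apply Bool.not_eq_true _ |>.mp
    intro hall
    have hm : k - 1 ∈ List.range ((l.eraseIdx j).length - 1) := by
      rw [hlen]; exact List.mem_range.mpr (by omega)
    have := List.all_eq_true.mp (by rwa [pvS] at hall) _ hm
    rw [hd0, hd1, pvGetD_erase_ge l j (k - 1) (by omega),
        show k - 1 + 1 = k by omega, pvGetD_erase_ge l j k (by omega)] at this
    rw [hbad] at this
    exact absurd this (by simp)
  · -- k + 1 < j : the pair survives at indices (k, k+1)
    have hgt : k + 1 < j := by omega
    apply Bool.not_eq_true _ |>.mp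
    intro hall
    have hm : k ∈ List.range ((l.eraseIdx j).length - 1) := by
      rw [hlen]; exact List.mem_range.mpr (by omega)
    have := List.all_eq_true.mp (by rwa [pvS] at hall) _ hm
    rw [hd0, hd1, pvGetD_erase_lt l j k (by omega), pvGetD_erase_lt l j (k + 1) hgt] at this
    rw [hbad] at this
    exact absurd this (by simp)

theorem pvS_short (l : List Int) (h : l.length < 2) : pvS l = true := by
  unfold pvS
  rw [show l.length - 1 = 0 by omega]
  rfl

-- ===== VERDICT (by name: the statement is the Claim_ definition above) =====
theorem check_dampened_safety_spec : Claim_equal_check_dampened_safety := by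
  intro l _
  unfold Spec_check_dampened_safety check_dampened_safety check_dampened_safety_alt
  by_cases hS : pvS l = true
  · rw [pvIsSafeA_eq, pvSafeB_eq, hS]; rfl
  · have hS' : pvS l = false := Bool.not_eq_true _ |>.mp hS
    have hn : 2 ≤ l.length := by
      by_contra hc
      exact hS (pvS_short l (by omega))
    rw [pvIsSafeA_eq, pvSafeB_eq, hS']
    simp only [Bool.false_eq_true, if_false]
    rcases hfb : pvFindBad l (decide (l.getD 0 0 < l.getD 1 0)) (List.range (l.length - 1)) with _ | k
    · -- impossible: no violating pair means pvS l = true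
      have := pvFindBad_none l _ _ hfb
      rw [show ((List.range (l.length - 1)).all fun i =>
            pvOk (decide (l.getD 0 0 < l.getD 1 0)) (l.getD i 0) (l.getD (i + 1) 0)) = pvS l
          from rfl, hS'] at this
      exact absurd this (by simp)
    · rcases pvFindBad_some l _ _ _ hfb with ⟨hkmem, hkbad⟩
      have hk : k + 1 < l.length := by
        have := List.mem_range.mp hkmem; omega
      rw [pvLoopDampA_eq]
      apply Bool.eq_iff_iff.mpr
      constructor
      · intro ha
        rcases List.any_eq_true.mp ha with ⟨j, hjm, hjs⟩
        have hjn : j < l.length := List.mem_range.mp hjm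
        rw [pvIsSafeA_eq] at hjs
        by_cases hc : j = 0 ∨ j = 1 ∨ j = k ∨ j = k + 1
        · apply List.any_eq_true.mpr
          refine ⟨j, ?_, by rwa [pvSafeB_eq]⟩
          rcases hc with h | h | h | h <;> simp [h]
        · push Not at hc
          have := pvPersist l k j hk hjn (by omega) hc.2.2.1 hc.2.2.2 hkbad
          rw [this] at hjs
          exact absurd hjs (by simp)
      · intro hb
        rcases List.any_eq_true.mp hb with ⟨j, hjm, hjs⟩
        apply List.any_eq_true.mpr
        refine ⟨j, List.mem_range.mpr ?_, by rwa [pvIsSafeA_eq, ← pvSafeB_eq]⟩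
        simp only [List.mem_cons, List.not_mem_nil, or_false] at hjm
        rcases hjm with h | h | h | h <;> omega
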